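-- pv_equiv track=rewrite | github.com/GregEPersonal/xpong | main.py | get_recent_rally
-- ===== SOURCE A (Python) =====
-- def get_recent_rally(events):
--     rally_count = 0
--     for event in events:
--         if event["type"] in ("shot_speed", "serve_speed"):
--             rally_count += 1
--         elif event["type"] == "point_scored":
--             rally_count = 0
--     return rally_count
-- ===== SOURCE B (Python) =====
-- def get_recent_rally(events):
--     types = [event["type"] for event in events]
--     rally_count = 0
--     for t in reversed(types):
--         if t == "point_scored":
--             break
--         if t in ("shot_speed", "serve_speed"):
--             rally_count += 1
--     return rally_count
-- ===== Notes on version B (the rewrite author's own statement) =====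
-- stated objective: alternative
-- what changed: B materializes the event types, then scans them backwards counting shot/serve events and stopping at the first point_scored, instead of A's forward running counter that resets on point_scored.
import Mathlib
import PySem

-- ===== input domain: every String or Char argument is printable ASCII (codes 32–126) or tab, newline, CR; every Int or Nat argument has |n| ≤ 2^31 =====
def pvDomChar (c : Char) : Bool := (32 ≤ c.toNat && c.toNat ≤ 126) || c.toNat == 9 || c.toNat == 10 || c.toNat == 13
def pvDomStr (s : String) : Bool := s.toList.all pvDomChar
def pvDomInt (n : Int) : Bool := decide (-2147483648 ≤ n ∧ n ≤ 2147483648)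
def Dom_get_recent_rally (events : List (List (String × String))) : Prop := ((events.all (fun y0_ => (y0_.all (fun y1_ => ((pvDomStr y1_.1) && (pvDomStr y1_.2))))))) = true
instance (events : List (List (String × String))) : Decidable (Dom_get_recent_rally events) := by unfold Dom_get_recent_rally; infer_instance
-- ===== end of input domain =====

-- B scans the materialized type list backwards, stopping at the first point_scored; A keeps a
-- forward running counter reset on point_scored. Equivalence of return values on Pre_.

-- ===== PORT A =====
-- forward pass: counter incremented on shot/serve, reset on point_scored (getD is exact under Pre_)
def get_recent_rally (events : List (List (String × String))) : Int :=
  events.foldl (fun rally_count event =>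
    let t := (PySem.Dict.mk event).getD "type" ""
    if t = "shot_speed" ∨ t = "serve_speed" then rally_count + 1
    else if t = "point_scored" then 0 else rally_count) 0

-- ===== PORT B =====
-- backward scan with early stop over the materialized type list
def pvCountBack : List String → Int
  | [] => 0
  | t :: rest =>
    if t = "point_scored" then 0
    else (if t = "shot_speed" ∨ t = "serve_speed" then 1 else 0) + pvCountBack rest

def get_recent_rally_alt (events : List (List (String × String))) : Int :=
  let types := events.map (fun event => (PySem.Dict.mk event).getD "type" "")
  pvCountBack types.reverse

-- ===== PRECONDITION & SPEC =====
-- Pre_ excludes events missing a "type" key, on which both Pythons raise KeyError.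
def Pre_get_recent_rally (events : List (List (String × String))) : Prop :=
  (events.all (fun event => (PySem.Dict.mk event).contains "type")) = true
instance (events : List (List (String × String))) : Decidable (Pre_get_recent_rally events) := by unfold Pre_get_recent_rally; infer_instance
def pvWitness_get_recent_rally : (List (List (String × String))) := [[("type", "shot_speed")], [("type", "point_scored")], [("type", "serve_speed")]]

def Spec_get_recent_rally (events : List (List (String × String))) (out : Int) : Prop := out = get_recent_rally_alt events
instance (events : List (List (String × String))) (out : Int) : Decidable (Spec_get_recent_rally events out) := by unfold Spec_get_recent_rally; infer_instance

-- ===== CLAIM (what is proved, stated in full; the proofs are below) =====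
def Claim_equal_get_recent_rally : Prop := ∀ (events : List (List (String × String))), Dom_get_recent_rally events → Pre_get_recent_rally events → Spec_get_recent_rally events (get_recent_rally events)

-- ===== LEMMAS AND PROOFS =====

def pvStep (rally_count : Int) (t : String) : Int :=
  if t = "shot_speed" ∨ t = "serve_speed" then rally_count + 1
  else if t = "point_scored" then 0 else rally_count

lemma pvFold_eq_countBack (ts : List String) :
    ts.foldl pvStep 0 = pvCountBack ts.reverse := by
  induction ts using List.reverseRecOn with
  | nil => rfl
  | append_singleton ts t ih =>
    rw [List.foldl_append, List.foldl_cons, List.foldl_nil, List.reverse_append]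
    simp only [List.reverse_cons, List.reverse_nil, List.nil_append, List.singleton_append,
      pvCountBack, pvStep, ← ih]
    by_cases h1 : t = "shot_speed" ∨ t = "serve_speed"
    · have h2 : ¬ t = "point_scored" := by rcases h1 with h | h <;> subst h <;> decide
      simp [h1, h2]; ring
    · by_cases h2 : t = "point_scored" <;> simp [h1, h2]

lemma pvA_fold (events : List (List (String × String))) :
    get_recent_rally events
      = (events.map (fun event => (PySem.Dict.mk event).getD "type" "")).foldl pvStep 0 := by
  rw [List.foldl_map]; rfl

-- ===== VERDICT (by name: the statement is the Claim_ definition above) =====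
theorem get_recent_rally_spec : Claim_equal_get_recent_rally := by
  intro events _ _
  unfold Spec_get_recent_rally get_recent_rally_alt
  rw [pvA_fold, pvFold_eq_countBack]
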